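-- pv_equiv track=rewrite | github.com/tosin2013/character-music-mcp | mcp_middleware.py | _extract_section_conflicts
-- ===== SOURCE A (Python) =====
-- from typing import Dict, List, Optional, Any
--
-- def _extract_section_conflicts(text: str) -> List[str]:
--     """Extract conflicts and challenges in section"""
--     conflict_words = ['but', 'however', 'although', 'despite', 'against', 'struggle', 'challenge', 'difficult']
--     conflicts = []
--
--     sentences = text.split('.')
--     for sentence in sentences:
--         for word in conflict_words:
--             if word in sentence.lower():
--                 conflicts.append(sentence.strip())
--                 break
--
--     return conflicts[:2]
-- ===== SOURCE B (Python) =====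
-- _WORDS = ('but', 'however', 'although', 'despite', 'against', 'struggle', 'challenge', 'difficult')
--
-- def _contains_conflict(low):
--     # single left-to-right automaton-style scan: simulate all partial matches at once
--     pending = []  # suffixes of conflict words still to be matched at the current position
--     for ch in low:
--         nxt = []
--         for suf in pending + list(_WORDS):
--             if suf and suf[0] == ch:
--                 if len(suf) == 1:
--                     return True
--                 nxt.append(suf[1:])
--         pending = nxt
--     return False
--
-- def _extract_section_conflicts(text):
--     """Extract conflicts and challenges in section"""
--     picked = []
--     for sentence in text.split('.'):
--         if len(picked) == 2:
--             break
--         if _contains_conflict(sentence.lower()):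
--             picked.append(sentence.strip())
--     return picked
-- ===== Notes on version B (the rewrite author's own statement) =====
-- stated objective: alternative
-- what changed: The per-sentence test is now a single left-to-right automaton-style scan that advances a set of pending word suffixes (all eight patterns matched simultaneously, NFA-simulation style) instead of A's one-substring-search-per-word inner loop, and the outer loop stops as soon as two conflict sentences are collected instead of collecting all and slicing.
import Mathlib
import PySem

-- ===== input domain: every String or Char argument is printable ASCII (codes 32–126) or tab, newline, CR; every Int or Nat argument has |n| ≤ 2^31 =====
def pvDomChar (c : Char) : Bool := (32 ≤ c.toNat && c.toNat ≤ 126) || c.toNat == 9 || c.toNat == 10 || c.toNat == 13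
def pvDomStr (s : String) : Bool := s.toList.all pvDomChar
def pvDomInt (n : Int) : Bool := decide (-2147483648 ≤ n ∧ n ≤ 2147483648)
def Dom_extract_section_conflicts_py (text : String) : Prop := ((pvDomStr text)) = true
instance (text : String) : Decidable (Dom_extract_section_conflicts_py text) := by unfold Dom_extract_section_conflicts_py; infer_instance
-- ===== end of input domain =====

-- B replaces A's word-major inner loop (one substring search per conflict word) by a single
-- left-to-right automaton-style scan of each lowered sentence that advances a set of pending
-- word suffixes (an NFA simulation over all eight patterns at once), and its outer loop stops
-- as soon as two conflict sentences are collected instead of collecting all and slicing;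
-- objective: alternative (different matching algorithm, same result).

-- ===== PORT A =====
-- the conflict_words list of A
def pvWordsA : List String := ["but", "however", "although", "despite", "against", "struggle", "challenge", "difficult"]

-- A's inner 'for word in conflict_words: if word in sentence.lower(): …; break' — whether the break fires
def pvAnyWordA (low : String) : List String → Bool
  | [] => false
  | w :: ws => if PySem.Str.isIn w low then true else pvAnyWordA low ws

def extract_section_conflicts_py (text : String) : List String :=
  -- text.split('.'): sep "." is non-empty, so split? is always `some`; getD [] only removes the Option
  (((PySem.Str.split? text ".").getD []).foldl
    (fun conflicts sentence =>
      if pvAnyWordA (PySem.Str.lower sentence) pvWordsA then conflicts ++ [PySem.Str.strip sentence]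
      else conflicts) []).take 2  -- conflicts[:2]

-- ===== PORT B =====
-- Source B's _WORDS tuple, as character lists (B scans sentences character by character)
def pvWordsB : List (List Char) :=
  [['b','u','t'], ['h','o','w','e','v','e','r'], ['a','l','t','h','o','u','g','h'],
   ['d','e','s','p','i','t','e'], ['a','g','a','i','n','s','t'], ['s','t','r','u','g','g','l','e'],
   ['c','h','a','l','l','e','n','g','e'], ['d','i','f','f','i','c','u','l','t']]

-- Source B's inner 'for suf in pending + list(_WORDS): …' loop for one character ch:
-- `none` means a word just completed ('return True'), `some nxt` is the new pending list
def pvStep (ch : Char) : List (List Char) → Option (List (List Char))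
  | [] => some []
  | suf :: more =>
    match suf with
    | [] => pvStep ch more                           -- 'if suf' fails: skip
    | c :: rest =>
      if c = ch then
        if rest = [] then none                       -- len(suf) == 1: return True
        else (pvStep ch more).map (rest :: ·)        -- nxt.append(suf[1:])
      else pvStep ch more

-- Source B's _contains_conflict: 'for ch in low: …' with the pending set threaded through
def pvScan (pending : List (List Char)) (low : List Char) : Bool :=
  match low with
  | [] => false
  | ch :: restLow =>
    match pvStep ch (pending ++ pvWordsB) with
    | none => true
    | some nxt => pvScan nxt restLow

-- Source B's collecting loop with its 'if len(picked) == 2: break'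
def pvCollect (sentences : List String) (picked : List String) : List String :=
  match sentences with
  | [] => picked
  | sentence :: rest =>
    if picked.length == 2 then picked
    else if pvScan [] (PySem.Str.lower sentence).toList then
      pvCollect rest (picked ++ [PySem.Str.strip sentence])
    else pvCollect rest picked

def extract_section_conflicts_py_alt (text : String) : List String :=
  pvCollect ((PySem.Str.split? text ".").getD []) []

-- ===== PRECONDITION & SPEC =====
def Spec_extract_section_conflicts_py (text : String) (out : List String) : Prop := out = extract_section_conflicts_py_alt text
instance (text : String) (out : List String) : Decidable (Spec_extract_section_conflicts_py text out) := by unfold Spec_extract_section_conflicts_py; infer_instance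

-- ===== CLAIM (what is proved, stated in full; the proofs are below) =====
def Claim_equal_extract_section_conflicts_py : Prop := ∀ (text : String), Dom_extract_section_conflicts_py text → Spec_extract_section_conflicts_py text (extract_section_conflicts_py text)

-- ===== LEMMAS AND PROOFS =====

-- A's inner loop is an `any` over the word list
theorem pvAnyWordA_eq_any (low : String) (ws : List String) :
    pvAnyWordA low ws = ws.any (fun w => PySem.Str.isIn w low) := by
  induction ws with
  | nil => rfl
  | cons w ws ih =>
    simp only [pvAnyWordA, List.any_cons, ih]
    cases PySem.Str.isIn w low <;> simp

-- advancing one suffix by one character (the filterMap view of Source B's inner loop)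
def pvAdv (ch : Char) (suf : List Char) : Option (List Char) :=
  match suf with
  | [] => none
  | c :: rest => if c = ch then some rest else none

theorem pvStep_eq_none_iff (ch : Char) (cand : List (List Char)) :
    pvStep ch cand = none ↔ [ch] ∈ cand := by
  induction cand with
  | nil => simp [pvStep]
  | cons suf more ih =>
    match suf with
    | [] => simp [pvStep, ih]
    | c :: rest =>
      by_cases hc : c = ch
      · subst hc
        by_cases hr : rest = []
        · subst hr; simp [pvStep]
        · simp only [pvStep, if_neg hr, List.mem_cons]
          cases h : pvStep c more <;>
            simp_all [Option.map]
      · simp only [pvStep, if_neg hc, ih, List.mem_cons]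
        constructor
        · intro h; right; exact h
        · rintro (h | h)
          · cases h; exact absurd rfl hc
          · exact h

theorem pvStep_eq_some (ch : Char) (cand : List (List Char)) (h : [ch] ∉ cand) :
    pvStep ch cand = some (cand.filterMap (pvAdv ch)) := by
  induction cand with
  | nil => rfl
  | cons suf more ih =>
    have hm : [ch] ∉ more := fun hx => h (List.mem_cons_of_mem _ hx)
    match suf with
    | [] => simpa [pvStep, pvAdv, List.filterMap_cons] using ih hm
    | c :: rest =>
      by_cases hc : c = ch
      · subst hc
        have hr : rest ≠ [] := by
          intro hx; subst hx; exact h (List.mem_cons_self)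
        simp [pvStep, if_neg hr, ih hm, pvAdv]
      · simp [pvStep, hc, ih hm, pvAdv]

-- every conflict word is a nonempty character list
theorem pvWordsB_ne_nil : ∀ w ∈ pvWordsB, w ≠ [] := by decide

-- the scan invariant: it succeeds iff a pending suffix is a nonempty prefix of the rest,
-- or some conflict word occurs (as a prefix of a drop) inside the rest
theorem pvScan_iff (low : List Char) : ∀ (pending : List (List Char)),
    pvScan pending low = true ↔
      (∃ s ∈ pending, s ≠ [] ∧ s <+: low) ∨
      (∃ w ∈ pvWordsB, ∃ i < low.length, w <+: low.drop i) := by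
  induction low with
  | nil =>
    intro pending
    simp only [pvScan]
    constructor
    · intro h; cases h
    · rintro (⟨s, _, hne, hpre⟩ | ⟨w, _, i, hi, _⟩)
      · exact absurd (List.prefix_nil.mp hpre) hne
      · simp at hi
  | cons ch restLow ih =>
    intro pending
    simp only [pvScan]
    by_cases hmem : [ch] ∈ pending ++ pvWordsB
    · rw [(pvStep_eq_none_iff ch _).mpr hmem]
      simp only [true_iff]
      rcases List.mem_append.mp hmem with h | h
      · exact Or.inl ⟨[ch], h, by simp, by simp⟩
      · exact Or.inr ⟨[ch], h, 0, by simp, by simp⟩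
    · rw [pvStep_eq_some ch _ hmem]
      simp only [ih]
      constructor
      · rintro (⟨s', hs', hne', hpre'⟩ | ⟨w, hw, i, hi, hp⟩)
        · obtain ⟨s, hs, hadv⟩ := List.mem_filterMap.mp hs'
          obtain ⟨c, rest, rfl⟩ : ∃ c rest, s = c :: rest := by
            cases s with
            | nil => simp [pvAdv] at hadv
            | cons c rest => exact ⟨c, rest, rfl⟩
          have hc : c = ch ∧ rest = s' := by
            by_cases h : c = ch
            · refine ⟨h, ?_⟩; simpa [pvAdv, h] using hadv
            · simp [pvAdv, h] at hadv
          obtain ⟨rfl, rfl⟩ := hc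
          rcases List.mem_append.mp hs with h | h
          · exact Or.inl ⟨c :: rest, h, by simp, List.cons_prefix_cons.mpr ⟨rfl, hpre'⟩⟩
          · have hpc : c :: rest <+: c :: restLow := List.cons_prefix_cons.mpr ⟨rfl, hpre'⟩
            exact Or.inr ⟨c :: rest, h, 0, by simp, by simpa using hpc⟩
        · exact Or.inr ⟨w, hw, i + 1, by simpa using hi, by simpa using hp⟩
      · rintro (⟨s, hs, hne, hpre⟩ | ⟨w, hw, i, hi, hp⟩)
        · obtain ⟨c, rest, rfl⟩ : ∃ c rest, s = c :: rest := by
            cases s with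
            | nil => exact absurd rfl hne
            | cons c rest => exact ⟨c, rest, rfl⟩
          obtain ⟨rfl, hpre'⟩ := List.cons_prefix_cons.mp hpre
          have hrest : rest ≠ [] := by
            intro hx; subst hx
            exact hmem (List.mem_append.mpr (Or.inl hs))
          exact Or.inl ⟨rest, List.mem_filterMap.mpr
            ⟨c :: rest, List.mem_append.mpr (Or.inl hs), by simp [pvAdv]⟩, hrest, hpre'⟩
        · cases i with
          | zero =>
            simp only [List.drop_zero] at hp
            obtain ⟨c, rest, rfl⟩ : ∃ c rest, w = c :: rest := by
              cases w with
              | nil => exact absurd rfl (pvWordsB_ne_nil _ hw)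
              | cons c rest => exact ⟨c, rest, rfl⟩
            obtain ⟨rfl, hpre'⟩ := List.cons_prefix_cons.mp hp
            have hrest : rest ≠ [] := by
              intro hx; subst hx
              exact hmem (List.mem_append.mpr (Or.inr hw))
            exact Or.inl ⟨rest, List.mem_filterMap.mpr
              ⟨c :: rest, List.mem_append.mpr (Or.inr hw), by simp [pvAdv]⟩, hrest, hpre'⟩
          | succ j =>
            exact Or.inr ⟨w, hw, j, by simpa using hi, by simpa using hp⟩

-- the word list of B is the character-list image of A's
theorem pvWordsB_eq_map : pvWordsB = pvWordsA.map String.toList := by decide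

-- the two per-sentence tests agree
theorem pvTest_eq (s : String) :
    pvAnyWordA (PySem.Str.lower s) pvWordsA = pvScan [] (PySem.Str.lower s).toList := by
  rw [pvAnyWordA_eq_any, Bool.eq_iff_iff, List.any_eq_true, pvScan_iff]
  constructor
  · rintro ⟨w, hw, hin⟩
    have hin' : PySem.Chars.isIn w.toList (PySem.Str.lower s).toList = true := by
      simpa [PySem.Str.isIn] using hin
    obtain ⟨j, hpre⟩ := (PySem.Chars.exists_prefix_drop_iff_isIn _ _).mpr hin'
    have hwB : w.toList ∈ pvWordsB := by
      rw [pvWordsB_eq_map]; exact List.mem_map_of_mem hw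
    have hwne : w.toList ≠ [] := pvWordsB_ne_nil _ hwB
    have hj : j < (PySem.Str.lower s).toList.length := by
      by_contra hge
      rw [List.drop_eq_nil_of_le (by omega)] at hpre
      exact hwne (List.prefix_nil.mp hpre)
    exact Or.inr ⟨w.toList, hwB, j, hj, hpre⟩
  · rintro (⟨s', hs', _, _⟩ | ⟨w, hw, i, hi, hp⟩)
    · simp at hs'
    · rw [pvWordsB_eq_map] at hw
      obtain ⟨ws, hws, rfl⟩ := List.mem_map.mp hw
      refine ⟨ws, hws, ?_⟩
      have : PySem.Chars.isIn ws.toList (PySem.Str.lower s).toList = true :=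
        (PySem.Chars.exists_prefix_drop_iff_isIn _ _).mp ⟨i, hp⟩
      simpa [PySem.Str.isIn] using this
  
-- B's early-stopping loop computes take 2 of the full filtered list
theorem pvCollect_eq_take (sentences : List String) (acc : List String) (h : acc.length ≤ 2) :
    pvCollect sentences acc =
      (acc ++ (sentences.filter
        (fun s => pvScan [] (PySem.Str.lower s).toList)).map PySem.Str.strip).take 2 := by
  induction sentences generalizing acc with
  | nil => simp [pvCollect, List.take_of_length_le h]
  | cons s rest ih =>
    simp only [pvCollect]
    by_cases h2 : acc.length == 2
    · rw [if_pos h2]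
      have hlen : acc.length = 2 := by simpa using h2
      rw [List.take_append_of_le_length (by omega), List.take_of_length_le (by omega)]
    · rw [if_neg h2]
      have hlt : acc.length ≤ 1 := by
        have : acc.length ≠ 2 := by simpa using h2
        omega
      by_cases hp : pvScan [] (PySem.Str.lower s).toList = true
      · rw [if_pos hp, ih (acc ++ [PySem.Str.strip s]) (by simp; omega)]
        rw [List.filter_cons, if_pos hp]
        simp
      · rw [if_neg hp, ih acc (by omega)]
        rw [List.filter_cons, if_neg hp]

-- ===== VERDICT (by name: the statement is the Claim_ definition above) =====
theorem extract_section_conflicts_py_spec : Claim_equal_extract_section_conflicts_py := by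
  unfold Claim_equal_extract_section_conflicts_py
  intro text _
  unfold Spec_extract_section_conflicts_py extract_section_conflicts_py extract_section_conflicts_py_alt
  rw [PySem.List.foldl_append_if (fun s => pvAnyWordA (PySem.Str.lower s) pvWordsA) PySem.Str.strip]
  rw [pvCollect_eq_take _ [] (by simp)]
  simp only [List.nil_append]
  congr 2
  apply List.filter_congr
  intro s _
  exact pvTest_eq s
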